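-- pv_equiv track=rewrite | github.com/UlugbekMuslitdinov/csc110 | listing.py | odds_or_evens
-- ===== SOURCE A (Python) =====
-- def odds_or_evens(numbers):
--     """
--     This function returns a numbers of the odd or even numbers in the numbers.
--     The function loops through the numbers and adds the odd or even numbers to a numbers and compares number of values in each numbers.
--     Then the function returns the numbers with the most values.
--
--     Params:
--         numbers: a numbers of numbers
--
--     Returns:
--         odd_even_list: a numbers of numbers
--     """
--     odds = []
--     evens = []
--     for i in numbers:
--         if i % 2 == 0:
--             evens.append(i)
--         else:
--             odds.append(i)
--     if len(odds) > len(evens):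
--         return odds
--     else:
--         return evens
-- ===== SOURCE B (Python) =====
-- def odds_or_evens(numbers):
--     evens_count = sum(1 for x in numbers if x % 2 == 0)
--     odds_count = len(numbers) - evens_count
--     if odds_count > evens_count:
--         return [x for x in numbers if x % 2 != 0]
--     else:
--         return [x for x in numbers if x % 2 == 0]
-- ===== Notes on version B (the rewrite author's own statement) =====
-- stated objective: alternative
-- what changed: Instead of partitioning into two lists in one pass, B counts evens in a counting pass (odds = len - evens) and then builds only the winning list with a single filter.
import Mathlib
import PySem

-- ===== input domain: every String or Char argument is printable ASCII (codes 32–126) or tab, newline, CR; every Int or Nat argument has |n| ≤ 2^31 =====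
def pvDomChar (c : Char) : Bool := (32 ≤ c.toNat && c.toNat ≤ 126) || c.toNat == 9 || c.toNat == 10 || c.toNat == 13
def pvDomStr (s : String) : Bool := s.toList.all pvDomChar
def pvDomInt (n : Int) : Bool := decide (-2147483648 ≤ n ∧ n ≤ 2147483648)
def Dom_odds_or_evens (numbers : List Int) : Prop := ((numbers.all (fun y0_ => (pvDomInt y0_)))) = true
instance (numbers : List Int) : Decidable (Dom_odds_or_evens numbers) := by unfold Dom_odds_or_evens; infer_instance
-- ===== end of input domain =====

-- B replaces A's two-list partition by a counting pass plus a single filter building only the winning list (alternative decomposition, same cost).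


-- ===== PORT A =====
-- one pass building both lists, then compare their lengths
def odds_or_evens (numbers : List Int) : List Int :=
  let st := numbers.foldl
    (fun (s : List Int × List Int) i =>
      if PySem.Int.mod i 2 == 0 then (s.1, s.2 ++ [i]) else (s.1 ++ [i], s.2))
    ([], [])
  if st.2.length < st.1.length then st.1 else st.2

-- ===== PORT B =====
-- count evens, derive odds count, build only the winning list
def odds_or_evens_alt (numbers : List Int) : List Int :=
  let evens_count : Int := numbers.countP (fun x => PySem.Int.mod x 2 == 0)
  let odds_count : Int := numbers.length - evens_count
  if evens_count < odds_count then
    numbers.filter (fun x => !(PySem.Int.mod x 2 == 0))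
  else
    numbers.filter (fun x => PySem.Int.mod x 2 == 0)

-- ===== PRECONDITION & SPEC =====
def Spec_odds_or_evens (numbers : List Int) (out : List Int) : Prop := out = odds_or_evens_alt numbers
instance (numbers : List Int) (out : List Int) : Decidable (Spec_odds_or_evens numbers out) := by unfold Spec_odds_or_evens; infer_instance

-- ===== CLAIM (what is proved, stated in full; the proofs are below) =====
def Claim_equal_odds_or_evens : Prop := ∀ (numbers : List Int), Dom_odds_or_evens numbers → Spec_odds_or_evens numbers (odds_or_evens numbers)

-- ===== LEMMAS AND PROOFS =====

theorem odds_or_evens_loop (l : List Int) (o e : List Int) :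
    l.foldl (fun (s : List Int × List Int) i =>
      if PySem.Int.mod i 2 == 0 then (s.1, s.2 ++ [i]) else (s.1 ++ [i], s.2)) (o, e)
    = (o ++ l.filter (fun x => !(PySem.Int.mod x 2 == 0)),
       e ++ l.filter (fun x => PySem.Int.mod x 2 == 0)) := by
  induction l generalizing o e with
  | nil => simp
  | cons a t ih =>
    simp only [List.foldl_cons, List.filter_cons]
    cases hb : (PySem.Int.mod a 2 == 0) with
    | true => rw [ih]; simp
    | false => rw [ih]; simp

theorem filter_split_len (l : List Int) :
    (l.filter (fun x => !(PySem.Int.mod x 2 == 0))).length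
      + (l.filter (fun x => PySem.Int.mod x 2 == 0)).length = l.length := by
  induction l with
  | nil => rfl
  | cons a t ih =>
    simp only [List.filter_cons]
    cases hb : (PySem.Int.mod a 2 == 0) with
    | true => simp at ih ⊢; omega
    | false => simp at ih ⊢; omega

-- ===== VERDICT =====
theorem odds_or_evens_spec : Claim_equal_odds_or_evens := by
  intro numbers _
  unfold Spec_odds_or_evens odds_or_evens odds_or_evens_alt
  rw [odds_or_evens_loop]
  simp only [List.nil_append]
  have hlen := filter_split_len numbers
  have hcnt : numbers.countP (fun x => PySem.Int.mod x 2 == 0)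
      = (numbers.filter (fun x => PySem.Int.mod x 2 == 0)).length := by
    simp [List.countP_eq_length_filter]
  by_cases hc : (numbers.filter (fun x => PySem.Int.mod x 2 == 0)).length
      < (numbers.filter (fun x => !(PySem.Int.mod x 2 == 0))).length
  · rw [if_pos hc, if_pos (by rw [hcnt]; omega)]
  · rw [if_neg hc, if_neg (by rw [hcnt]; omega)]
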